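-- pv_equiv track=rewrite | github.com/Aurora-TF/Algorithm | week1 - array/koo/2_42840.py | solution
-- ===== SOURCE A (Python) =====
-- def check_score(answers, pattern):
--     length = len(pattern)
--     total_problem = len(answers)
--     score = 0
--
--     for i in range(total_problem):
--         index = i % length
--         if answers[i] == pattern[index]:
--             score += 1
--
--     return score
--
-- def solution(answers):
--     answer = []
--     first = [1,2,3,4,5]
--     second = [2,1,2,3,2,4,2,5]
--     third = [3,3,1,1,2,2,4,4,5,5]
--
--     score_result = []
--
--     score_result.append(check_score(answers, first))
--     score_result.append(check_score(answers, second))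
--     score_result.append(check_score(answers, third))
--
--     answer.append(1)
--
--     for i in range(1, 3):
--         if score_result[i] > score_result[answer[0] - 1]:
--             answer = [i + 1]
--         elif score_result[i] == score_result[answer[0] - 1]:
--             answer.append(i + 1)
--
--     return answer
-- ===== SOURCE B (Python) =====
-- def solution(answers):
--     patterns = [[1, 2, 3, 4, 5],
--                 [2, 1, 2, 3, 2, 4, 2, 5],
--                 [3, 3, 1, 1, 2, 2, 4, 4, 5, 5]]
--     # All three patterns repeat with period dividing 40 (lcm of 5, 8, 10), so a
--     # histogram of answers keyed by (position mod 40, value) determines every score.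
--     hist = {}
--     for i, a in enumerate(answers):
--         key = (i % 40, a)
--         hist[key] = hist.get(key, 0) + 1
--     scores = [sum(hist.get((r, p[r % len(p)]), 0) for r in range(40)) for p in patterns]
--     best = max(scores)
--     return [k + 1 for k, s in enumerate(scores) if s == best]
-- ===== Notes on version B (the rewrite author's own statement) =====
-- stated objective: alternative
-- what changed: Instead of comparing each answer against each pattern (A's three check_score passes), B builds a histogram keyed by (position mod 40, value) in one pass — 40 being the lcm of the pattern periods — and reads each pattern's score off the histogram as a fixed 40-term table sum; winners are then picked by max + filter instead of A's stateful best-so-far loop.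
import Mathlib
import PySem

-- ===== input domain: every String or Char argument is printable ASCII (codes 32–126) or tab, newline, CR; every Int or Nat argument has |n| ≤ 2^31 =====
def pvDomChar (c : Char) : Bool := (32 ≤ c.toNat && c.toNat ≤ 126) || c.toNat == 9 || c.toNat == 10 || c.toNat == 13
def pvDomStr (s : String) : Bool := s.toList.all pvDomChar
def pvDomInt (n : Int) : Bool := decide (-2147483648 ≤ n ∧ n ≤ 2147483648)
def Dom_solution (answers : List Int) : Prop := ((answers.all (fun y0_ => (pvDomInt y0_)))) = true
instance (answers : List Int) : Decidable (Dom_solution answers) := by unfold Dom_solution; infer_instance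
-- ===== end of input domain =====

-- B replaces A's per-pattern comparison loops by a (position mod 40, value) histogram built in one
-- pass (40 = lcm of the pattern periods), reading each score off the histogram as a 40-term table
-- sum, and picks winners by max + filter instead of A's stateful best-so-far loop; same return value.

-- ===== PORT A =====
def check_score (answers pattern : List Int) : Int :=
  let length : Int := (pattern.length : Int)
  let total_problem : Int := (answers.length : Int)
  (PySem.List.pyRange 0 total_problem 1).foldl
    (fun score i =>
      let index := PySem.Int.mod i length
      if PySem.List.pyGetD answers i 0 = PySem.List.pyGetD pattern index 0 then score + 1
      else score)
    0

def solution (answers : List Int) : List Int :=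
  let first : List Int := [1, 2, 3, 4, 5]
  let second : List Int := [2, 1, 2, 3, 2, 4, 2, 5]
  let third : List Int := [3, 3, 1, 1, 2, 2, 4, 4, 5, 5]
  let score_result : List Int :=
    [check_score answers first, check_score answers second, check_score answers third]
  let answer : List Int := [1]
  (PySem.List.pyRange 1 3 1).foldl
    (fun answer i =>
      if PySem.List.pyGetD score_result i 0 >
          PySem.List.pyGetD score_result (PySem.List.pyGetD answer 0 0 - 1) 0 then [i + 1]
      else if PySem.List.pyGetD score_result i 0 =
          PySem.List.pyGetD score_result (PySem.List.pyGetD answer 0 0 - 1) 0 then answer ++ [i + 1]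
      else answer)
    answer

-- ===== PORT B =====
def solution_alt (answers : List Int) : List Int :=
  let patterns : List (List Int) :=
    [[1, 2, 3, 4, 5], [2, 1, 2, 3, 2, 4, 2, 5], [3, 3, 1, 1, 2, 2, 4, 4, 5, 5]]
  -- hist[(i % 40, a)] = hist.get((i % 40, a), 0) + 1 over enumerate(answers)
  let hist : PySem.Dict (Int × Int) Int :=
    (PySem.List.enumerate answers).foldl
      (fun h p =>
        h.insert (PySem.Int.mod p.1 40, p.2) (h.getD (PySem.Int.mod p.1 40, p.2) 0 + 1))
      PySem.Dict.empty
  let scores : List Int :=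
    patterns.map (fun p =>
      ((PySem.List.pyRange 0 40 1).map
        (fun r => hist.getD (r, PySem.List.pyGetD p (PySem.Int.mod r (p.length : Int)) 0) 0)).sum)
  let best : Int := ((PySem.List.max? scores (fun s => s)).getD 0)
  (PySem.List.enumerate scores).foldl
    (fun acc q => if q.2 = best then acc ++ [q.1 + 1] else acc) []

-- ===== PRECONDITION & SPEC =====
def Spec_solution (answers : List Int) (out : List Int) : Prop := out = solution_alt answers
instance (answers : List Int) (out : List Int) : Decidable (Spec_solution answers out) := by unfold Spec_solution; infer_instance

-- ===== CLAIM (what is proved, stated in full; the proofs are below) =====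
def Claim_equal_solution : Prop := ∀ (answers : List Int), Dom_solution answers → Spec_solution answers (solution answers)

-- ===== LEMMAS AND PROOFS =====

theorem modpos (a L : Int) (h0 : 0 < L) : PySem.Int.mod a L = a % L := by
  rw [PySem.Int.mod, Int.fmod_eq_emod]; simp [h0.le]

theorem mod_mod_forty (a L : Int) (h : L ∣ 40) (h0 : 0 < L) :
    PySem.Int.mod (PySem.Int.mod a 40) L = PySem.Int.mod a L := by
  rw [modpos a 40 (by norm_num), modpos _ _ h0, modpos _ _ h0]
  exact Int.emod_emod_of_dvd a h

theorem mod_forty_bounds (a : Int) : 0 ≤ PySem.Int.mod a 40 ∧ PySem.Int.mod a 40 < 40 := by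
  rw [modpos _ _ (by norm_num)]
  exact ⟨Int.emod_nonneg a (by norm_num), Int.emod_lt_of_pos a (by norm_num)⟩

-- A's per-pattern index loop, read as a fold over enumerate(answers).
theorem check_score_eq_enum (answers pattern : List Int) :
    check_score answers pattern =
      (PySem.List.enumerate answers).foldl
        (fun score p =>
          if p.2 = PySem.List.pyGetD pattern (PySem.Int.mod p.1 (pattern.length : Int)) 0 then score + 1
          else score) 0 := by
  rw [PySem.List.enumerate_eq_map_pyRange answers (0 : Int), List.foldl_map]
  simp [check_score]

-- A's count, as an explicit countP over enumerate(answers).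
theorem check_score_eq_countP (answers pattern : List Int) :
    check_score answers pattern =
      ((PySem.List.enumerate answers).countP
        (fun p => decide (p.2 = PySem.List.pyGetD pattern (PySem.Int.mod p.1 (pattern.length : Int)) 0)) : Int) := by
  rw [check_score_eq_enum, PySem.List.foldl_ite_add_one]
  simp

-- an indicator sum over a list not containing r0 vanishes
theorem ind_sum_zero (tgt : Int → Int) (r0 v : Int) :
    ∀ (l : List Int), r0 ∉ l →
    (l.map (fun r => if (r0, v) = (r, tgt r) then (1 : Int) else 0)).sum = 0 := by
  intro l
  induction l with
  | nil => intro _; simp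
  | cons a t ih =>
    intro h
    have ha : r0 ≠ a := fun he => h (he ▸ List.mem_cons_self)
    have ht : r0 ∉ t := fun hm => h (List.mem_cons_of_mem a hm)
    simp only [List.map_cons, List.sum_cons, ih ht]
    have hne : (r0, v) ≠ (a, tgt a) := fun hp => ha (congrArg Prod.fst hp)
    rw [if_neg hne]; simp

-- an indicator sum over a Nodup list containing r0 is the single hit
theorem ind_sum_single (tgt : Int → Int) (r0 v : Int) :
    ∀ (l : List Int), l.Nodup → r0 ∈ l →
    (l.map (fun r => if (r0, v) = (r, tgt r) then (1 : Int) else 0)).sum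
      = if v = tgt r0 then 1 else 0 := by
  intro l
  induction l with
  | nil => intro _ h; simp at h
  | cons a t ih =>
    intro hnd hm
    rcases List.mem_cons.mp hm with he | hmt
    · subst he
      have hnt : r0 ∉ t := (List.nodup_cons.mp hnd).1
      simp only [List.map_cons, List.sum_cons, ind_sum_zero tgt r0 v t hnt]
      simp [Prod.ext_iff]
    · have ha : r0 ≠ a := fun he => ((List.nodup_cons.mp hnd).1) (he ▸ hmt)
      simp only [List.map_cons, List.sum_cons, ih (List.nodup_cons.mp hnd).2 hmt]
      have hne : (r0, v) ≠ (a, tgt a) := fun hp => ha (congrArg Prod.fst hp)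
      rw [if_neg hne]; simp

-- CORE: summing the (i mod 40, value)-histogram over the 40 residues along a pattern's cycle
-- recovers the plain per-position match count, because the pattern's period divides 40.
theorem hist_sum_eq_countP (pattern : List Int) (hdvd : (pattern.length : Int) ∣ 40)
    (hpos : (0 : Int) < (pattern.length : Int)) :
    ∀ (l : List (Int × Int)),
    ((PySem.List.pyRange 0 40 1).map
      (fun r => ((l.map (fun p => (PySem.Int.mod p.1 40, p.2))).count
        (r, PySem.List.pyGetD pattern (PySem.Int.mod r (pattern.length : Int)) 0) : Int))).sum
    = (l.countP
        (fun p => decide (p.2 = PySem.List.pyGetD pattern (PySem.Int.mod p.1 (pattern.length : Int)) 0)) : Int) := by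
  intro l
  induction l with
  | nil => simp
  | cons p t ih =>
    have hsplit :
        (fun r => (((p :: t).map (fun p => (PySem.Int.mod p.1 40, p.2))).count
            (r, PySem.List.pyGetD pattern (PySem.Int.mod r (pattern.length : Int)) 0) : Int))
        = (fun r => ((t.map (fun p => (PySem.Int.mod p.1 40, p.2))).count
            (r, PySem.List.pyGetD pattern (PySem.Int.mod r (pattern.length : Int)) 0) : Int)
            + (if ((PySem.Int.mod p.1 40, p.2)
                  = (r, PySem.List.pyGetD pattern (PySem.Int.mod r (pattern.length : Int)) 0)) then (1 : Int) else 0)) := by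
      funext r
      rw [List.map_cons, List.count_cons]
      push_cast
      split_ifs with h1 h2 h2 <;> simp_all
    rw [hsplit, PySem.List.sum_map_add_int, ih]
    rw [ind_sum_single
        (fun r => PySem.List.pyGetD pattern (PySem.Int.mod r (pattern.length : Int)) 0)
        (PySem.Int.mod p.1 40) p.2 (PySem.List.pyRange 0 40 1)
        (PySem.List.nodup_pyRange_one 0 40)
        (by
          rw [PySem.List.mem_pyRange_one]
          exact mod_forty_bounds p.1)]
    rw [mod_mod_forty p.1 (pattern.length : Int) hdvd hpos]
    rw [List.countP_cons]
    push_cast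
    split_ifs with h1 h2 h2 <;> simp_all

-- B's histogram lookups are counts over the key-mapped enumerate list.
theorem hist_getD (answers : List Int) (x : Int × Int) :
    ((PySem.List.enumerate answers).foldl
      (fun h p =>
        h.insert (PySem.Int.mod p.1 40, p.2) (h.getD (PySem.Int.mod p.1 40, p.2) 0 + 1))
      PySem.Dict.empty).getD x 0
    = (((PySem.List.enumerate answers).map (fun p => (PySem.Int.mod p.1 40, p.2))).count x : Int) := by
  have h1 : (PySem.List.enumerate answers).foldl
      (fun h p =>
        h.insert (PySem.Int.mod p.1 40, p.2) (h.getD (PySem.Int.mod p.1 40, p.2) 0 + 1))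
      (PySem.Dict.empty : PySem.Dict (Int × Int) Int)
      = ((PySem.List.enumerate answers).map (fun p => (PySem.Int.mod p.1 40, p.2))).foldl
        (fun h x => h.insert x (h.getD x 0 + 1)) (PySem.Dict.empty : PySem.Dict (Int × Int) Int) := by
    rw [List.foldl_map]
  refine (congrArg (fun d : PySem.Dict (Int × Int) Int => d.getD x 0) h1).trans ?_
  rw [PySem.Dict.getD_foldl_insert_add_one]
  simp

-- each of B's three table sums equals A's check_score
theorem score_eq (answers pattern : List Int) (hdvd : (pattern.length : Int) ∣ 40)
    (hpos : (0 : Int) < (pattern.length : Int)) :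
    ((PySem.List.pyRange 0 40 1).map
      (fun r => ((PySem.List.enumerate answers).foldl
        (fun h p =>
          h.insert (PySem.Int.mod p.1 40, p.2) (h.getD (PySem.Int.mod p.1 40, p.2) 0 + 1))
        PySem.Dict.empty).getD
          (r, PySem.List.pyGetD pattern (PySem.Int.mod r (pattern.length : Int)) 0) 0)).sum
    = check_score answers pattern := by
  have : (fun r => ((PySem.List.enumerate answers).foldl
        (fun h p =>
          h.insert (PySem.Int.mod p.1 40, p.2) (h.getD (PySem.Int.mod p.1 40, p.2) 0 + 1))
        PySem.Dict.empty).getD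
          (r, PySem.List.pyGetD pattern (PySem.Int.mod r (pattern.length : Int)) 0) 0)
      = (fun r => (((PySem.List.enumerate answers).map (fun p => (PySem.Int.mod p.1 40, p.2))).count
          (r, PySem.List.pyGetD pattern (PySem.Int.mod r (pattern.length : Int)) 0) : Int)) := by
    funext r; exact hist_getD answers _
  rw [this, hist_sum_eq_countP pattern hdvd hpos, check_score_eq_countP]

-- A's selection loop over the concrete 3-element score list = B's max + filter over enumerate.
theorem select (c1 c2 c3 : Int) :
    (PySem.List.pyRange 1 3 1).foldl
      (fun answer i =>
        if PySem.List.pyGetD [c1, c2, c3] i 0 >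
            PySem.List.pyGetD [c1, c2, c3] (PySem.List.pyGetD answer 0 0 - 1) 0 then [i + 1]
        else if PySem.List.pyGetD [c1, c2, c3] i 0 =
            PySem.List.pyGetD [c1, c2, c3] (PySem.List.pyGetD answer 0 0 - 1) 0 then answer ++ [i + 1]
        else answer)
      [1]
    = (PySem.List.enumerate [c1, c2, c3]).foldl
        (fun acc q => if q.2 = ((PySem.List.max? [c1, c2, c3] (fun s => s)).getD 0) then acc ++ [q.1 + 1] else acc) [] := by
  have hr : PySem.List.pyRange 1 3 1 = [1, 2] := by rfl
  have hm : (PySem.List.max? [c1, c2, c3] (fun s => s)).getD 0 = max (max c1 c2) c3 := by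
    rw [PySem.List.max?_id_cons]; simp
  have he : PySem.List.enumerate [c1, c2, c3] = [(0, c1), (1, c2), (2, c3)] := by
    simp [PySem.List.enumerate_cons, PySem.List.enumerate_nil]
  have A0 : PySem.List.pyGetD [c1, c2, c3] (PySem.List.pyGetD [1] 0 0 - 1) 0 = c1 := rfl
  have A1 : PySem.List.pyGetD [c1, c2, c3] (PySem.List.pyGetD [2] 0 0 - 1) 0 = c2 := rfl
  have A2 : PySem.List.pyGetD [c1, c2, c3] (PySem.List.pyGetD [1, 2] 0 0 - 1) 0 = c1 := rfl
  have A3 : PySem.List.pyGetD [c1, c2, c3] (PySem.List.pyGetD ([1] ++ [1 + 1]) 0 0 - 1) 0 = c1 := rfl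
  have A4 : PySem.List.pyGetD [c1, c2, c3] (PySem.List.pyGetD [1 + 1] 0 0 - 1) 0 = c2 := rfl
  have B1 : PySem.List.pyGetD [c1, c2, c3] (1 : Int) 0 = c2 := rfl
  have B2 : PySem.List.pyGetD [c1, c2, c3] (2 : Int) 0 = c3 := rfl
  rw [hr, hm, he]
  simp only [List.foldl_cons, List.foldl_nil]
  split_ifs <;>
    first
      | rfl
      | (exfalso
         simp only [A0, A1, A2, A3, A4, B1, B2] at *
         omega)

theorem solution_eq_alt (answers : List Int) : solution answers = solution_alt answers := by
  simp only [solution, solution_alt, List.map_cons, List.map_nil]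
  simp only [score_eq answers [1, 2, 3, 4, 5] (by norm_num) (by norm_num),
      score_eq answers [2, 1, 2, 3, 2, 4, 2, 5] (by norm_num) (by norm_num),
      score_eq answers [3, 3, 1, 1, 2, 2, 4, 4, 5, 5] (by norm_num) (by norm_num)]
  exact select _ _ _

-- ===== VERDICT (by name: the statement is the Claim_ definition above) =====
theorem solution_spec : Claim_equal_solution := by
  intro answers _
  exact solution_eq_alt answers
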